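-- pv_equiv track=rewrite | github.com/pisterlabs/promptset | data/scraping-2.0/repos/WaterSo0910~AuditryGPT/audit.py | parse_solidity
-- ===== SOURCE A (Python) =====
-- def parse_solidity(content):
--     paranthesis = 0
--     current_contract = []
--     contract_segments = []
--     for i in content.split("\n"):
--         if "{" in i:
--             paranthesis += 1
--         if "}" in i:
--             paranthesis -= 1
--         if paranthesis != 0:
--             current_contract.append(i)
--             if len(current_contract) > 5:
--                 contract_segments.append("\n".join(current_contract))
--                 current_contract = []
--     if len(current_contract)>1:
--         contract_segments.append("\n".join(current_contract))
--     return contract_segments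
-- ===== SOURCE B (Python) =====
-- def parse_solidity(content):
--     # Phase 1: keep exactly the lines where the running brace depth is nonzero
--     # after processing the line.
--     depth = 0
--     kept = []
--     for line in content.split("\n"):
--         if "{" in line:
--             depth += 1
--         if "}" in line:
--             depth -= 1
--         if depth != 0:
--             kept.append(line)
--     # Phase 2: slice the kept lines into consecutive chunks of 6; a shorter
--     # trailing chunk is emitted only if it has more than one line.
--     segs = []
--     while len(kept) >= 6:
--         segs.append("\n".join(kept[:6]))
--         kept = kept[6:]
--     if len(kept) > 1:
--         segs.append("\n".join(kept))
--     return segs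
-- ===== Notes on version B (the rewrite author's own statement) =====
-- stated objective: simpler
-- what changed: A fuses filtering and chunking in one loop over a mutable buffer; B first filters the lines with nonzero running brace depth in one pass, then chunks the filtered list into 6-line segments in a separate phase, with the trailing-chunk rule (>1 line) applied once.
import Mathlib
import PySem

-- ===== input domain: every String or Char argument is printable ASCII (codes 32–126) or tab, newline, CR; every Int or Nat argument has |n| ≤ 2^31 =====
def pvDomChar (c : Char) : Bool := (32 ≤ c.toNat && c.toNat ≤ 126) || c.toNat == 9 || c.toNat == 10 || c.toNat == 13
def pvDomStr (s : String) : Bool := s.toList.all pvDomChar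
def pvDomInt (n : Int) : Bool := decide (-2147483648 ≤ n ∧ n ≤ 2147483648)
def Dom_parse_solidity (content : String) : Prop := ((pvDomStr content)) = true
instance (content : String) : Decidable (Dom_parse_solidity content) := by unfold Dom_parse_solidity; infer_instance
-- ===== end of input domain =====

-- B replaces A's fused loop (filter + buffer + flush in one pass) by two phases: filter the
-- depth≠0 lines, then chunk the filtered list into 6-line segments (simpler decomposition, same cost).

-- ===== PORT A =====
-- literal transliteration of A: one fold carrying (paranthesis, current_contract, contract_segments);
-- content.split("\n") = Str.split? (sep "\n" ≠ "", so never none; getD [] only discharges the Option)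
def parse_solidity (content : String) : List String :=
  let st := ((PySem.Str.split? content "\n").getD []).foldl
    (fun (st : Int × List String × List String) i =>
      let p := if PySem.Str.isIn "{" i then st.1 + 1 else st.1
      let p := if PySem.Str.isIn "}" i then p - 1 else p
      if p ≠ 0 then
        let cur := st.2.1 ++ [i]
        if cur.length > 5 then (p, ([] : List String), st.2.2 ++ [PySem.Str.join "\n" cur])
        else (p, cur, st.2.2)
      else (p, st.2.1, st.2.2))
    (0, [], [])
  st.2.2 ++ (if st.2.1.length > 1 then [PySem.Str.join "\n" st.2.1] else [])

-- ===== PORT B =====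
-- Source B's while-loop over `kept`: kept[:6] / kept[6:] ported as take 6 / drop 6 (exact for these
-- fixed nonnegative bounds); the loop condition gives the termination argument
def pvChunkAlt (kept : List String) : List String :=
  if _h : 6 ≤ kept.length then
    PySem.Str.join "\n" (kept.take 6) :: pvChunkAlt (kept.drop 6)
  else if 1 < kept.length then [PySem.Str.join "\n" kept] else []
termination_by kept.length
decreasing_by simp; omega

def parse_solidity_alt (content : String) : List String :=
  let st := ((PySem.Str.split? content "\n").getD []).foldl
    (fun (st : Int × List String) line =>
      let d := if PySem.Str.isIn "{" line then st.1 + 1 else st.1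
      let d := if PySem.Str.isIn "}" line then d - 1 else d
      (d, if d ≠ 0 then st.2 ++ [line] else st.2))
    (0, [])
  pvChunkAlt st.2

-- ===== PRECONDITION & SPEC =====
def Spec_parse_solidity (content : String) (out : List String) : Prop := out = parse_solidity_alt content
instance (content : String) (out : List String) : Decidable (Spec_parse_solidity content out) := by unfold Spec_parse_solidity; infer_instance

-- ===== CLAIM (what is proved, stated in full; the proofs are below) =====
def Claim_equal_parse_solidity : Prop := ∀ (content : String), Dom_parse_solidity content → Spec_parse_solidity content (parse_solidity content)

-- ===== LEMMAS AND PROOFS =====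

-- the lines B's filter phase keeps from `lines` starting at depth p, and the final depth
def pvKeptOf : List String → Int → List String
  | [], _ => []
  | i :: rest, p =>
    let p1 := if PySem.Str.isIn "{" i then p + 1 else p
    let p2 := if PySem.Str.isIn "}" i then p1 - 1 else p1
    if p2 ≠ 0 then i :: pvKeptOf rest p2 else pvKeptOf rest p2

def pvDepthOf : List String → Int → Int
  | [], p => p
  | i :: rest, p =>
    let p1 := if PySem.Str.isIn "{" i then p + 1 else p
    let p2 := if PySem.Str.isIn "}" i then p1 - 1 else p1
    pvDepthOf rest p2

-- A's loop restricted to the kept lines (buffer `cur`, flush at 6, trailing rule > 1)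
def pvG : List String → List String → List String
  | cur, [] => if cur.length > 1 then [PySem.Str.join "\n" cur] else []
  | cur, x :: xs =>
    if (cur ++ [x]).length > 5 then PySem.Str.join "\n" (cur ++ [x]) :: pvG [] xs
    else pvG (cur ++ [x]) xs

-- named copies of the two ports' fold steps (definitionally equal to the inline lambdas)
def pvStepA (st : Int × List String × List String) (i : String) : Int × List String × List String :=
  let p := if PySem.Str.isIn "{" i then st.1 + 1 else st.1
  let p := if PySem.Str.isIn "}" i then p - 1 else p
  if p ≠ 0 then
    let cur := st.2.1 ++ [i]
    if cur.length > 5 then (p, ([] : List String), st.2.2 ++ [PySem.Str.join "\n" cur])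
    else (p, cur, st.2.2)
  else (p, st.2.1, st.2.2)

def pvStepB (st : Int × List String) (line : String) : Int × List String :=
  let d := if PySem.Str.isIn "{" line then st.1 + 1 else st.1
  let d := if PySem.Str.isIn "}" line then d - 1 else d
  (d, if d ≠ 0 then st.2 ++ [line] else st.2)

theorem pvFoldB_eq (lines : List String) : ∀ (p : Int) (acc : List String),
    lines.foldl pvStepB (p, acc) = (pvDepthOf lines p, acc ++ pvKeptOf lines p) := by
  induction lines with
  | nil => intro p acc; simp [pvDepthOf, pvKeptOf]
  | cons i rest ih =>
    intro p acc
    rw [List.foldl_cons]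
    rcases hstep : pvStepB (p, acc) i with ⟨d, ks⟩
    rw [ih]
    simp only [pvStepB, Prod.mk.injEq] at hstep
    obtain ⟨hd, hks⟩ := hstep
    subst hd hks
    simp only [pvDepthOf, pvKeptOf]
    split_ifs <;> simp

theorem pvFoldA_eq (lines : List String) : ∀ (p : Int) (cur segs : List String),
    (lines.foldl pvStepA (p, cur, segs)).2.2 ++
      (if (lines.foldl pvStepA (p, cur, segs)).2.1.length > 1 then
        [PySem.Str.join "\n" (lines.foldl pvStepA (p, cur, segs)).2.1] else [])
    = segs ++ pvG cur (pvKeptOf lines p) := by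
  induction lines with
  | nil => intro p cur segs; simp [pvG, pvKeptOf]
  | cons i rest ih =>
    intro p cur segs
    rw [List.foldl_cons]
    rcases hstep : pvStepA (p, cur, segs) i with ⟨d, cur', segs'⟩
    rw [ih]
    simp only [pvStepA] at hstep
    simp only [pvKeptOf]
    split_ifs at hstep ⊢ <;>
      (simp only [Prod.mk.injEq] at hstep; obtain ⟨h3, h4, h5⟩ := hstep; subst h3 h4 h5) <;>
      simp [pvG]
    all_goals (rename_i hne hlen; intro hlt; simp at hlen; omega)

theorem pvG_eq_chunk (k : List String) : ∀ (cur : List String), cur.length ≤ 5 →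
    pvG cur k = pvChunkAlt (cur ++ k) := by
  induction k with
  | nil =>
    intro cur hc
    rw [pvChunkAlt]
    simp [pvG]
    omega
  | cons x xs ih =>
    intro cur hc
    by_cases h : (cur ++ [x]).length > 5
    · have h6 : (cur ++ [x]).length = 6 := by simp at h ⊢; omega
      have hsplit : cur ++ x :: xs = (cur ++ [x]) ++ xs := by simp
      rw [hsplit, pvChunkAlt,
        dif_pos (by simp only [List.length_append, List.length_cons, List.length_nil] at h6 ⊢; omega),
        ← h6, List.take_left, List.drop_left]
      simp only [pvG, if_pos h, ih [] (by simp)]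
      simp
    · simp only [pvG, if_neg h]
      rw [ih (cur ++ [x]) (by simp at h ⊢; omega)]
      simp

-- ===== VERDICT (by name: the statement is the Claim_ definition above) =====
theorem parse_solidity_spec : Claim_equal_parse_solidity := by
  intro content _
  show (List.foldl pvStepA (0, [], []) ((PySem.Str.split? content "\n").getD [])).2.2 ++
      (if (List.foldl pvStepA (0, [], []) ((PySem.Str.split? content "\n").getD [])).2.1.length > 1 then
        [PySem.Str.join "\n" (List.foldl pvStepA (0, [], []) ((PySem.Str.split? content "\n").getD [])).2.1] else [])
    = pvChunkAlt (List.foldl pvStepB (0, []) ((PySem.Str.split? content "\n").getD [])).2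
  rw [pvFoldA_eq, pvFoldB_eq, pvG_eq_chunk _ [] (by simp)]
  simp
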